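-- pv_equiv track=rewrite | github.com/yogurt-shadow/Berkeley-cs61a | lecture/hearthstone.py | makeup
-- ===== SOURCE A (Python) =====
-- def makeup(list):
--     result = []
--     while list:
--         a = min(list)
--         fre = 0
--         for i in list:
--             if i == a:
--                 fre = fre + 1
--         list = [j for j in list if j != a]
--         result = result + [a] + [fre]
--     return result
-- ===== SOURCE B (Python) =====
-- def makeup(list):
--     s = sorted(list)
--     if not s:
--         return []
--     result = []
--     cur = s[0]
--     cnt = 1
--     for x in s[1:]:
--         if x == cur:
--             cnt += 1
--         else:
--             result.append(cur)
--             result.append(cnt)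
--             cur, cnt = x, 1
--     result.append(cur)
--     result.append(cnt)
--     return result
-- ===== Notes on version B (the rewrite author's own statement) =====
-- stated objective: faster
-- what changed: Replaces A's repeated min-extraction (find min, count it, rebuild the list without it, per distinct value) with a single sort followed by one linear grouping pass.
import Mathlib
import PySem

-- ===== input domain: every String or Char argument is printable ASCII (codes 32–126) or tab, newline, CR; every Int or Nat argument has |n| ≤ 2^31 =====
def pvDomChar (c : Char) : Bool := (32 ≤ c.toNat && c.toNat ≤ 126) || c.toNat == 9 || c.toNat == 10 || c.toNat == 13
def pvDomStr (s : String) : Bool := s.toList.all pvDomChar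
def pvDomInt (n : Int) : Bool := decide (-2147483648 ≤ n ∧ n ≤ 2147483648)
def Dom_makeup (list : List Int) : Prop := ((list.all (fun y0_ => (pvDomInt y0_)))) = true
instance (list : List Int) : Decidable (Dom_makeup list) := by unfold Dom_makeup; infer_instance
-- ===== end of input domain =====

-- B replaces A's quadratic repeated min-extraction with one sort followed by a single grouping pass (simpler and faster in the mechanism; A is O(n^2), B is O(n log n)).
-- A only rebinds its local 'list' variable, so there is no observable argument mutation to mirror.

-- ===== PORT A =====
-- helper for the termination of A's while loop: filtering out an element that is present shrinks the list
theorem pvCountLt (l : List Int) (a : Int) (h : a ∈ l) :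
    l.countP (fun j => !decide (j = a)) < l.length := by
  have hle := List.countP_le_length (p := fun j => !decide (j = a)) (l := l)
  rcases Nat.lt_or_eq_of_le hle with h' | h'
  · exact h'
  · exfalso
    rw [List.countP_eq_length] at h'
    have := h' a h
    simp at this

-- A's while loop, carrying 'result': min, count it with a for loop, filter it out, append [a, fre]
def makeupLoop (result : List Int) (list : List Int) : List Int :=
  match hm : PySem.List.min? list (fun x => x) with
  | none => result   -- 'while list:' exits (min? = none ↔ list = [])
  | some a =>
    let fre : Int := list.foldl (fun fre i => if i = a then fre + 1 else fre) 0
    makeupLoop (result ++ [a] ++ [fre]) (list.filter (fun j => decide (j ≠ a)))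
termination_by list.length
decreasing_by
  simp only [List.length_unattach, ← List.countP_eq_length_filter, ne_eq, decide_not]
  rw [List.countP_attach (p := fun j => !decide (j = a))]
  exact pvCountLt list a (PySem.List.min?_mem hm)

def makeup (list : List Int) : List Int := makeupLoop [] list

-- ===== PORT B =====
-- B: s = sorted(list); single pass over s[1:] maintaining (result, cur, cnt); flush at the end
def makeup_alt (list : List Int) : List Int :=
  match PySem.List.sorted list (fun x => x) with
  | [] => []
  | x :: xs =>
    let st := xs.foldl
      (fun (st : List Int × Int × Int) y =>
        if y = st.2.1 then (st.1, st.2.1, st.2.2 + 1)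
        else (st.1 ++ [st.2.1, st.2.2], y, 1))
      (([] : List Int), x, (1 : Int))
    st.1 ++ [st.2.1, st.2.2]

-- ===== PRECONDITION & SPEC =====
def Spec_makeup (list : List Int) (out : List Int) : Prop := out = makeup_alt list
instance (list : List Int) (out : List Int) : Decidable (Spec_makeup list out) := by unfold Spec_makeup; infer_instance

-- ===== CLAIM (what is proved, stated in full; the proofs are below) =====
def Claim_equal_makeup : Prop := ∀ (list : List Int), Dom_makeup list → Spec_makeup list (makeup list)

-- ===== LEMMAS AND PROOFS =====

-- canonical grouping: head of the sorted list, its count, then recurse with that value removed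
def grp : List Int → List Int
  | [] => []
  | x :: xs => x :: ((x :: xs).count x : Nat) :: grp (xs.filter (fun j => decide (j ≠ x)))
termination_by l => l.length
decreasing_by
  simp only [List.length_unattach, ← List.countP_eq_length_filter]
  rw [List.countP_attach (p := fun j => decide (j ≠ x))]
  exact Nat.lt_succ_of_le List.countP_le_length

theorem count_eq_zero_of_lt (l : List Int) (a : Int) (h : ∀ y ∈ l, a < y) :
    l.count a = 0 := by
  rw [List.count_eq_zero]
  intro hmem
  exact absurd rfl (ne_of_gt (h a hmem))

theorem filter_eq_self_of_lt (l : List Int) (a : Int) (h : ∀ y ∈ l, a < y) :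
    l.filter (fun j => decide (j ≠ a)) = l := by
  rw [List.filter_eq_self]
  intro x hx
  simpa using (h x hx).ne' 

-- A's counting for-loop is List.count
theorem foldl_count (a : Int) : ∀ (l : List Int) (acc : Int),
    l.foldl (fun fre i => if i = a then fre + 1 else fre) acc = acc + (l.count a : Nat) := by
  intro l
  induction l with
  | nil => intro acc; simp
  | cons x xs ih =>
    intro acc
    by_cases hx : x = a
    · subst hx
      simp only [List.foldl_cons, List.count_cons_self, ih]
      push_cast
      ring
    · simp only [List.foldl_cons, if_neg hx, ih, List.count_cons_of_ne hx]

-- B's fold computes grp of a sorted list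
theorem fold_eq_grp : ∀ (xs res : List Int) (cur cnt : Int),
    List.Pairwise (· ≤ ·) xs → (∀ y ∈ xs, cur ≤ y) →
    (xs.foldl
      (fun (st : List Int × Int × Int) y =>
        if y = st.2.1 then (st.1, st.2.1, st.2.2 + 1)
        else (st.1 ++ [st.2.1, st.2.2], y, 1)) (res, cur, cnt)).1
    ++ [(xs.foldl
      (fun (st : List Int × Int × Int) y =>
        if y = st.2.1 then (st.1, st.2.1, st.2.2 + 1)
        else (st.1 ++ [st.2.1, st.2.2], y, 1)) (res, cur, cnt)).2.1,
        (xs.foldl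
      (fun (st : List Int × Int × Int) y =>
        if y = st.2.1 then (st.1, st.2.1, st.2.2 + 1)
        else (st.1 ++ [st.2.1, st.2.2], y, 1)) (res, cur, cnt)).2.2]
    = res ++ [cur, cnt + (xs.count cur : Nat)] ++ grp (xs.filter (fun j => decide (j ≠ cur))) := by
  intro xs
  induction xs with
  | nil =>
    intro res cur cnt _ _
    simp [grp]
  | cons y ys ih =>
    intro res cur cnt hp hle
    have hp' : List.Pairwise (· ≤ ·) ys := hp.of_cons
    have hhd : ∀ z ∈ ys, y ≤ z := fun z hz => List.rel_of_pairwise_cons hp hz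
    by_cases hy : y = cur
    · subst hy
      have h1 := ih res y (cnt + 1) hp' hhd
      simp only [List.foldl_cons]
      simp only [if_true]
      rw [h1]
      simp only [List.count_cons_self, List.filter_cons]
      have : (decide (y ≠ y)) = false := by simp
      rw [this]
      simp only [Bool.false_eq_true, if_false]
      push_cast
      ring_nf
    · have hlt : cur < y := lt_of_le_of_ne (hle y (List.mem_cons_self)) (Ne.symm hy)
      have hlt' : ∀ z ∈ y :: ys, cur < z := by
        intro z hz
        cases hz with
        | head => exact hlt
        | tail _ hz => exact lt_of_lt_of_le hlt (hhd z hz)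
      have h1 := ih (res ++ [cur, cnt]) y 1 hp' hhd
      simp only [List.foldl_cons]
      rw [if_neg hy]
      rw [h1]
      rw [count_eq_zero_of_lt _ _ hlt', filter_eq_self_of_lt _ _ hlt']
      rw [grp]
      simp only [List.count_cons_self]
      push_cast
      simp [List.append_assoc]
      omega

-- A's loop computes res ++ grp (sorted list)
theorem makeupLoop_eq (n : Nat) : ∀ (list : List Int), list.length ≤ n → ∀ (res : List Int),
    makeupLoop res list = res ++ grp (PySem.List.sorted list (fun x => x)) := by
  induction n with
  | zero =>
    intro list hlen res
    have : list = [] := List.eq_nil_of_length_eq_zero (Nat.le_zero.mp hlen)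
    subst this
    rw [makeupLoop]
    split
    · simp [grp, PySem.List.sorted]
    · rename_i a heq
      cases PySem.List.min?_mem heq
  | succ n ih =>
    intro list hlen res
    rcases hmin : PySem.List.min? list (fun x => x) with _ | a
    · have : list = [] := (PySem.List.min?_eq_none_iff _ _).mp hmin
      subst this
      rw [makeupLoop]
      split
      · simp [grp, PySem.List.sorted]
      · rename_i a heq
        cases PySem.List.min?_mem heq
    · have hamem : a ∈ list := PySem.List.min?_mem hmin
      have hmins : ∀ y ∈ list, a ≤ y := PySem.List.min?_isMin hmin
      -- unfold one iteration of A's loop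
      rw [makeupLoop]
      rw [show (match hm : PySem.List.min? list (fun x => x) with
        | none => res
        | some a =>
          makeupLoop (res ++ [a] ++ [list.foldl (fun fre i => if i = a then fre + 1 else fre) 0])
            (list.filter (fun j => decide (j ≠ a))))
        = makeupLoop (res ++ [a] ++ [list.foldl (fun fre i => if i = a then fre + 1 else fre) 0])
            (list.filter (fun j => decide (j ≠ a))) from by
          split
          · rename_i heq; rw [heq] at hmin; cases hmin
          · rename_i a' heq; rw [heq] at hmin; injection hmin with h; subst h; rfl]
      have hflen : (list.filter (fun j => decide (j ≠ a))).length < list.length := by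
        simp only [← List.countP_eq_length_filter, ne_eq, decide_not]
        exact pvCountLt list a hamem
      have hstep := ih (list.filter (fun j => decide (j ≠ a)))
        (by omega) (res ++ [a] ++ [list.foldl (fun fre i => if i = a then fre + 1 else fre) 0])
      rw [hstep]
      -- name the sorted list
      have hsne : PySem.List.sorted list (fun x => x) ≠ [] := by
        rw [Ne, PySem.List.sorted_eq_nil_iff]
        intro h; subst h; cases hamem
      rcases hs : PySem.List.sorted list (fun x => x) with _ | ⟨b, t⟩
      · exact absurd hs hsne
      have hperm : (b :: t).Perm list := by
        have := PySem.List.sorted_perm list (fun x => x) false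
        rwa [hs] at this
      have hb : b = a := by
        have h1 : a ≤ b := hmins b (hperm.mem_iff.mp List.mem_cons_self)
        have h2 : b ≤ a := PySem.List.key_head_sorted_le list (fun x => x) hs a hamem
        omega
      subst hb
      have hpair : List.Pairwise (· ≤ ·) (b :: t) := by
        have := PySem.List.sorted_pairwise list (fun x => x)
        rwa [hs] at this
      -- the filtered remainder sorts to t with b removed
      have hsortf : PySem.List.sorted (list.filter (fun j => decide (j ≠ b))) (fun x => x)
          = t.filter (fun j => decide (j ≠ b)) := by
        apply PySem.List.sorted_id_eq_of_perm_of_pairwise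
        · have h1 : ((b :: t).filter (fun j => decide (j ≠ b))).Perm
              (list.filter (fun j => decide (j ≠ b))) := hperm.filter _
          simpa using h1
        · exact List.Pairwise.sublist List.filter_sublist hpair.of_cons
      rw [hsortf, grp]
      -- counts agree via the permutation
      have hcnt : (b :: t).count b = list.count b := hperm.count_eq b
      rw [foldl_count]
      rw [← hcnt]
      simp [List.append_assoc]

-- ===== VERDICT (by name: the statement is the Claim_ definition above) =====
theorem makeup_spec : Claim_equal_makeup := by
  intro list _
  unfold Spec_makeup
  have hA : makeup list = grp (PySem.List.sorted list (fun x => x)) :=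
    makeupLoop_eq list.length list le_rfl []
  rw [hA]
  unfold makeup_alt
  rcases hs : PySem.List.sorted list (fun x => x) with _ | ⟨x, xs⟩
  · simp [grp]
  · have hpair : List.Pairwise (· ≤ ·) (x :: xs) := by
      have := PySem.List.sorted_pairwise list (fun x => x)
      rwa [hs] at this
    have := fold_eq_grp xs [] x 1 hpair.of_cons (fun z hz => List.rel_of_pairwise_cons hpair hz)
    dsimp only
    rw [this, grp]
    simp only [List.count_cons_self]
    push_cast
    simp [add_comm]
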